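-- pv_equiv track=rewrite | github.com/Tusenka/hackerrank | informatics/dp_phers_informatics.py | _phers
-- ===== SOURCE A (Python) =====
-- def _phers(n, m):
--     _dp=[[-1 for _ in range(m)] for _ in range(n)]
--     for i in range(m):
--         _dp[0][i]=1
--     for j in range(n):
--         _dp[j][0]=1
--     for i in range(min(n,m)):
--         _dp[i][i]=1
--     for i in range(1, n):
--         for j in range(1, m):
--                 if i==j:
--                     _dp[i][j]=1
--                 else:
--                     _dp[i][j]=any(not _dp[i][x] for x in range(j)) or any (not _dp[x][j] for x in range(i))
--     return 1 if _dp[n-1][m-1]==1 else 2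
-- ===== SOURCE B (Python) =====
-- def _phers(n, m):
--     # Closed form: the DP's corner cell loses exactly when |n-m| == 1 and min(n,m) is even.
--     return 2 if abs(n - m) == 1 and min(n, m) % 2 == 0 else 1
-- ===== Notes on version B (the rewrite author's own statement) =====
-- stated objective: faster
-- what changed: Replaced the O(n*m*(n+m)) win/lose DP table with a proved closed form: the corner cell loses exactly when |n-m| == 1 and min(n,m) is even.
import Mathlib
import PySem

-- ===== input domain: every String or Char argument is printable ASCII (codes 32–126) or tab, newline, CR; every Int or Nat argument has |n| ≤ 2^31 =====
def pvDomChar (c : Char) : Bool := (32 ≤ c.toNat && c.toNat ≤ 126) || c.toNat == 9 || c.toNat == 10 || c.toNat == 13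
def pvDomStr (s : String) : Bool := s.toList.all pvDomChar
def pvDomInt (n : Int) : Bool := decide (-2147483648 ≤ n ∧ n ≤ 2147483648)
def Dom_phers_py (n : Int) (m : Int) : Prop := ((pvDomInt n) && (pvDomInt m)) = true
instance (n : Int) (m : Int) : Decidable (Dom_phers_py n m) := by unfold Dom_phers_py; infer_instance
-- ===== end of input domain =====

-- B replaces A's cubic win/lose DP table by a proved closed form on (n, m).

-- ===== PORT A =====
-- The mutable n×m list-of-lists `_dp`, initialised to -1, is modelled as a map from the
-- cell index (i, j) to its entry; an unwritten cell reads as the initial -1 (exact here: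
-- on inputs admitted by Pre_ every Python read/write is in range).  Python bools stored
-- into the table are encoded as 1/0, which matches both their truthiness (`not _dp[..]`)
-- and the final `== 1` test; the initial -1 is truthy, matching Python.
def phersGet (dp : PySem.Dict (Int × Int) Int) (i j : Int) : Int := dp.getD (i, j) (-1)

-- body of the inner `for j in range(1, m)` loop
def phersStep (i : Int) (dp : PySem.Dict (Int × Int) Int) (j : Int) :
    PySem.Dict (Int × Int) Int :=
  if i = j then dp.insert (i, j) 1
  else
    dp.insert (i, j)
      (if ((PySem.List.pyRange 0 j 1).any (fun x => phersGet dp i x == 0)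
           || (PySem.List.pyRange 0 i 1).any (fun x => phersGet dp x j == 0)) then 1 else 0)

-- the four initialisation/fill loops, innermost first, then the final `== 1` test
def phers_py (n : Int) (m : Int) : Int :=
  if phersGet
      ((PySem.List.pyRange 1 n 1).foldl
        (fun dp i => (PySem.List.pyRange 1 m 1).foldl (phersStep i) dp)
        ((PySem.List.pyRange 0 (min n m) 1).foldl (fun dp i => dp.insert (i, i) 1)
          ((PySem.List.pyRange 0 n 1).foldl (fun dp j => dp.insert (j, 0) 1)
            ((PySem.List.pyRange 0 m 1).foldl (fun dp i => dp.insert (0, i) 1)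
              PySem.Dict.empty))))
      (n - 1) (m - 1) == 1
  then 1 else 2

-- ===== PORT B =====
def phers_py_alt (n : Int) (m : Int) : Int :=
  if (n - m).natAbs = 1 ∧ PySem.Int.mod (min n m) 2 = 0 then 2 else 1

-- ===== PRECONDITION & SPEC =====
-- Pre_ excludes exactly the inputs where A raises IndexError (n < 1 or m < 1: the table
-- is empty in the needed dimension and an assignment or the final _dp[n-1][m-1] fails).
def Pre_phers_py (n : Int) (m : Int) : Prop := 1 ≤ n ∧ 1 ≤ m
instance (n : Int) (m : Int) : Decidable (Pre_phers_py n m) := by unfold Pre_phers_py; infer_instance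
def pvWitness_phers_py : Int × Int := (2, 3)

def Spec_phers_py (n : Int) (m : Int) (out : Int) : Prop := out = phers_py_alt n m
instance (n : Int) (m : Int) (out : Int) : Decidable (Spec_phers_py n m out) := by unfold Spec_phers_py; infer_instance

-- ===== CLAIM (what is proved, stated in full; the proofs are below) =====
def Claim_equal_phers_py : Prop := ∀ (n : Int) (m : Int), Dom_phers_py n m → Pre_phers_py n m → Spec_phers_py n m (phers_py n m)

-- ===== LEMMAS AND PROOFS =====

-- The value the DP finally stores in cell (i, j) (proof-only helper).
def specCell (i : Int) (j : Int) : Int :=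
  if i = 0 ∨ j = 0 ∨ i = j then 1
  else if (i - j = 1 ∨ j - i = 1) ∧ min i j % 2 = 1 then 0 else 1

lemma specCell_base (i j : Int) (h : i = 0 ∨ j = 0 ∨ i = j) : specCell i j = 1 := by
  unfold specCell; rw [if_pos h]

lemma specCell_cases (i j : Int) : specCell i j = 0 ∨ specCell i j = 1 := by
  unfold specCell; split_ifs <;> simp

lemma specCell_eq_zero_iff (i j : Int) :
    specCell i j = 0 ↔ ¬(i = 0 ∨ j = 0 ∨ i = j) ∧ (i - j = 1 ∨ j - i = 1) ∧ min i j % 2 = 1 := by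
  unfold specCell; split_ifs <;> simp_all

lemma specCell_eq_one_iff (i j : Int) (h : ¬(i = 0 ∨ j = 0 ∨ i = j)) :
    specCell i j = 1 ↔ ¬((i - j = 1 ∨ j - i = 1) ∧ min i j % 2 = 1) := by
  unfold specCell; split_ifs <;> simp_all

-- The game characterisation: a cell off the border/diagonal wins iff some cell to its
-- left or above loses, iff it is NOT an adjacent-diagonal cell with odd min.
lemma spec_win_iff (i j : Int) (hi : 1 ≤ i) (hj : 1 ≤ j) (hij : i ≠ j) :
    ((∃ x, 0 ≤ x ∧ x < j ∧ specCell i x = 0) ∨ (∃ x, 0 ≤ x ∧ x < i ∧ specCell x j = 0)) ↔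
      specCell i j = 1 := by
  rw [specCell_eq_one_iff i j (by omega)]
  constructor
  · rintro (⟨x, hx0, hxj, hP⟩ | ⟨x, hx0, hxi, hP⟩) <;> rw [specCell_eq_zero_iff] at hP <;> omega
  · intro h1
    rcases lt_or_gt_of_ne hij with h | h
    · rcases Int.emod_two_eq i with hpar | hpar
      · exact Or.inl ⟨i - 1, by omega, by omega, by rw [specCell_eq_zero_iff]; omega⟩
      · exact Or.inl ⟨i + 1, by omega, by omega, by rw [specCell_eq_zero_iff]; omega⟩
    · rcases Int.emod_two_eq j with hpar | hpar
      · exact Or.inr ⟨j - 1, by omega, by omega, by rw [specCell_eq_zero_iff]; omega⟩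
      · exact Or.inr ⟨j + 1, by omega, by omega, by rw [specCell_eq_zero_iff]; omega⟩

-- Reading one cell through one write.
lemma phersGet_insert (dp : PySem.Dict (Int × Int) Int) (a b v x y : Int) :
    phersGet (dp.insert (a, b) v) x y = if (x, y) = (a, b) then v else phersGet dp x y := by
  unfold phersGet; rw [PySem.Dict.getD_insert]

-- Folds that only ever write the value 1 keep a cell already equal to 1.
lemma foldl_ins1_of_one (l : List Int) (r c : Int → Int) (dp : PySem.Dict (Int × Int) Int)
    (x y : Int) (h : phersGet dp x y = 1) :
    phersGet (l.foldl (fun d t => d.insert (r t, c t) 1) dp) x y = 1 := by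
  induction l generalizing dp with
  | nil => exact h
  | cons t ts ih =>
    simp only [List.foldl_cons]
    refine ih _ ?_
    rw [phersGet_insert]
    split_ifs <;> [rfl; exact h]

-- A cell hit by such a fold ends up 1.
lemma foldl_ins1_hit (l : List Int) (r c : Int → Int) (dp : PySem.Dict (Int × Int) Int)
    (t : Int) (ht : t ∈ l) :
    phersGet (l.foldl (fun d t => d.insert (r t, c t) 1) dp) (r t) (c t) = 1 := by
  induction l generalizing dp with
  | nil => cases ht
  | cons u us ih =>
    simp only [List.foldl_cons]
    rcases List.mem_cons.mp ht with rfl | ht'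
    · exact foldl_ins1_of_one us r c _ _ _ (by rw [phersGet_insert, if_pos rfl])
    · exact ih _ ht'

-- One inner-loop step writes specCell i j into cell (i, j) and preserves the invariant.
lemma phersStep_eval (n m i j : Int) (dp : PySem.Dict (Int × Int) Int)
    (hi : 1 ≤ i) (hin : i < n) (hj : 1 ≤ j) (hjm : j < m)
    (hinv : ∀ a b, 0 ≤ a → a < n → 0 ≤ b → b < m →
      (a = 0 ∨ b = 0 ∨ a = b ∨ a < i ∨ (a = i ∧ b < j)) → phersGet dp a b = specCell a b) :
    ∀ a b, 0 ≤ a → a < n → 0 ≤ b → b < m →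
      (a = 0 ∨ b = 0 ∨ a = b ∨ a < i ∨ (a = i ∧ b < j + 1)) →
      phersGet (phersStep i dp j) a b = specCell a b := by
  intro a b ha han hb hbm hcond
  by_cases hab : a = i ∧ b = j
  · -- the freshly written cell
    obtain ⟨rfl, rfl⟩ := hab
    by_cases hdiag : a = b
    · have hstep : phersStep a dp b = dp.insert (a, b) 1 := by
        unfold phersStep; rw [if_pos hdiag]
      rw [hstep, phersGet_insert, if_pos rfl, specCell_base a b (by omega)]
    · have hstep : phersStep a dp b = dp.insert (a, b)
          (if ((PySem.List.pyRange 0 b 1).any (fun x => phersGet dp a x == 0)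
               || (PySem.List.pyRange 0 a 1).any (fun x => phersGet dp x b == 0))
           then 1 else 0) := by
        unfold phersStep; rw [if_neg hdiag]
      rw [hstep, phersGet_insert, if_pos rfl]
      -- compute the two `any`s against specCell
      have hrow : (PySem.List.pyRange 0 b 1).any (fun x => phersGet dp a x == 0) =
          (PySem.List.pyRange 0 b 1).any (fun x => specCell a x == 0) := by
        apply PySem.List.any_congr_mem
        intro x hx
        rw [PySem.List.mem_pyRange_one] at hx
        rw [hinv a x (by omega) han hx.1 (by omega) (by omega)]
      have hcol : (PySem.List.pyRange 0 a 1).any (fun x => phersGet dp x b == 0) =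
          (PySem.List.pyRange 0 a 1).any (fun x => specCell x b == 0) := by
        apply PySem.List.any_congr_mem
        intro x hx
        rw [PySem.List.mem_pyRange_one] at hx
        rw [hinv x b hx.1 (by omega) (by omega) hbm (by omega)]
      rw [hrow, hcol]
      have hw : (((PySem.List.pyRange 0 b 1).any (fun x => specCell a x == 0)
            || (PySem.List.pyRange 0 a 1).any (fun x => specCell x b == 0)) = true) ↔
          specCell a b = 1 := by
        rw [← spec_win_iff a b (by omega) (by omega) hdiag]
        simp only [Bool.or_eq_true, List.any_eq_true, beq_iff_eq,
          PySem.List.mem_pyRange_one, and_assoc]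
      rcases specCell_cases a b with h0 | h1
      · rw [if_neg ((not_congr hw).mpr (by omega)), h0]
      · rw [if_pos (hw.mpr h1), h1]
  · -- an untouched cell
    have hkey : ¬((a, b) = (i, j)) := fun h =>
      hab ⟨congrArg Prod.fst h, congrArg Prod.snd h⟩
    have huntouched : phersGet (phersStep i dp j) a b = phersGet dp a b := by
      unfold phersStep
      by_cases hd : i = j
      · rw [if_pos hd, phersGet_insert, if_neg hkey]
      · rw [if_neg hd, phersGet_insert, if_neg hkey]
    rw [huntouched]
    exact hinv a b ha han hb hbm (by omega)

-- The inner loop `for j in range(j0, m)` completes row i.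
lemma inner_fold (n m i : Int) (hi : 1 ≤ i) (hin : i < n) :
    ∀ (k : Nat) (j : Int) (dp : PySem.Dict (Int × Int) Int), (m - j).toNat = k → 1 ≤ j → j ≤ m →
    (∀ a b, 0 ≤ a → a < n → 0 ≤ b → b < m →
      (a = 0 ∨ b = 0 ∨ a = b ∨ a < i ∨ (a = i ∧ b < j)) → phersGet dp a b = specCell a b) →
    ∀ a b, 0 ≤ a → a < n → 0 ≤ b → b < m →
      (a = 0 ∨ b = 0 ∨ a = b ∨ a < i ∨ a = i) →
      phersGet ((PySem.List.pyRange j m 1).foldl (phersStep i) dp) a b = specCell a b := by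
  intro k
  induction k with
  | zero =>
    intro j dp hk hj hjm hinv a b ha han hb hbm hcond
    rw [PySem.List.pyRange_one_eq_nil (show m ≤ j by omega), List.foldl_nil]
    exact hinv a b ha han hb hbm (by omega)
  | succ k ih =>
    intro j dp hk hj hjm hinv a b ha han hb hbm hcond
    have hjm' : j < m := by omega
    rw [PySem.List.pyRange_one_cons hjm', List.foldl_cons]
    exact ih (j + 1) (phersStep i dp j) (by omega) (by omega) (by omega)
      (phersStep_eval n m i j dp hi hin hj hjm' hinv) a b ha han hb hbm hcond

-- The outer loop `for i in range(i0, n)` completes the table.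
lemma outer_fold (n m : Int) (hm : 1 ≤ m) :
    ∀ (k : Nat) (i : Int) (dp : PySem.Dict (Int × Int) Int), (n - i).toNat = k → 1 ≤ i → i ≤ n →
    (∀ a b, 0 ≤ a → a < n → 0 ≤ b → b < m →
      (a = 0 ∨ b = 0 ∨ a = b ∨ a < i) → phersGet dp a b = specCell a b) →
    ∀ a b, 0 ≤ a → a < n → 0 ≤ b → b < m →
      phersGet ((PySem.List.pyRange i n 1).foldl
          (fun dp i' => (PySem.List.pyRange 1 m 1).foldl (phersStep i') dp) dp) a b
        = specCell a b := by
  intro k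
  induction k with
  | zero =>
    intro i dp hk hi hin hinv a b ha han hb hbm
    rw [PySem.List.pyRange_one_eq_nil (show n ≤ i by omega), List.foldl_nil]
    exact hinv a b ha han hb hbm (by omega)
  | succ k ih =>
    intro i dp hk hi hin hinv a b ha han hb hbm
    have hin' : i < n := by omega
    rw [PySem.List.pyRange_one_cons hin', List.foldl_cons]
    refine ih (i + 1) _ (by omega) (by omega) (by omega) ?_ a b ha han hb hbm
    intro a b ha han hb hbm hcond
    exact inner_fold n m i hi hin' (m - 1).toNat 1 dp (by omega) le_rfl hm
      (fun a b ha han hb hbm hc => hinv a b ha han hb hbm (by omega))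
      a b ha han hb hbm (by omega)

-- ===== VERDICT (by name: the statement is the Claim_ definition above) =====
theorem phers_py_spec : Claim_equal_phers_py := by
  intro n m _ hpre
  obtain ⟨hn, hm⟩ := hpre
  show phers_py n m = phers_py_alt n m
  unfold phers_py
  -- the initialised table (row 0, column 0, diagonal) agrees with specCell
  have hinit : ∀ a b : Int, 0 ≤ a → a < n → 0 ≤ b → b < m → (a = 0 ∨ b = 0 ∨ a = b ∨ a < 1) →
      phersGet ((PySem.List.pyRange 0 (min n m) 1).foldl (fun dp i => dp.insert (i, i) 1)
        ((PySem.List.pyRange 0 n 1).foldl (fun dp j => dp.insert (j, 0) 1)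
          ((PySem.List.pyRange 0 m 1).foldl (fun dp i => dp.insert (0, i) 1)
            PySem.Dict.empty)))
        a b = specCell a b := by
    intro a b ha han hb hbm hcond
    rw [specCell_base a b (by omega)]
    have hcond' : a = 0 ∨ b = 0 ∨ a = b := by omega
    rcases hcond' with rfl | rfl | rfl
    · -- row 0: hit by the first fold, preserved by the next two
      refine foldl_ins1_of_one _ (fun t => t) (fun t => t) _ _ _ ?_
      refine foldl_ins1_of_one _ (fun t => t) (fun _ => 0) _ _ _ ?_
      exact foldl_ins1_hit _ (fun _ => (0 : Int)) (fun t => t) _ b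
        (PySem.List.mem_pyRange_one.mpr ⟨hb, hbm⟩)
    · -- column 0: hit by the second fold
      refine foldl_ins1_of_one _ (fun t => t) (fun t => t) _ _ _ ?_
      exact foldl_ins1_hit _ (fun t => t) (fun _ => (0 : Int)) _ a
        (PySem.List.mem_pyRange_one.mpr ⟨ha, han⟩)
    · -- diagonal: hit by the third fold
      exact foldl_ins1_hit _ (fun t => t) (fun t => t) _ a
        (PySem.List.mem_pyRange_one.mpr ⟨ha, by omega⟩)
  have hfinal := outer_fold n m hm (n - 1).toNat 1 _ (by omega) le_rfl hn hinit
    (n - 1) (m - 1) (by omega) (by omega) (by omega) (by omega)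
  rw [hfinal]
  -- closed-form finish
  unfold phers_py_alt
  rw [PySem.Int.mod_eq_emod_of_pos (by omega : (0:Int) < 2)]
  unfold specCell
  simp only [beq_iff_eq]
  split_ifs <;> omega
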